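-- pv_equiv track=rewrite | github.com/Ricepaste/CPE | uva10101.py | trans_int
-- ===== SOURCE A (Python) =====
-- def unit(hun_int):
--     unit_int = ""
--     if hun_int % 10 > 0:
--         unit_int = f"{hun_int % 10} shata " + unit_int
--
--     hun_int //= 10
--     if hun_int % 100 > 0:
--         unit_int = f"{hun_int % 100} hajar " + unit_int
--
--     hun_int //= 100
--     if hun_int % 100 > 0:
--         unit_int = f"{hun_int % 100} lakh " + unit_int
--
--     hun_int //= 100
--     if hun_int % 100 > 0:
--         unit_int = f"{hun_int % 100} kuti " + unit_int
--     elif hun_int > 0: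
--         unit_int = f"kuti " + unit_int
--
--     hun_int -= hun_int % 100
--     carry_num = hun_int
--
--     return carry_num, unit_int
--
-- def trans_int(ori_int):
--     if ori_int == 0:
--         return "0"
--     elif ori_int % 100 == 0:
--         trans_output = ""
--     else:
--         trans_output = str(ori_int % 100)
--
--     while ori_int >= 100:
--         ori_int //= 100
--         ori_int, unit_int = unit(ori_int)
--         trans_output = unit_int + trans_output
--
--     return trans_output
-- ===== SOURCE B (Python) =====
-- def trans_int(ori_int):
--     if ori_int == 0:
--         return "0"
--     r = ori_int % 100
--     tail = str(r) if r else ""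
--     if ori_int < 100:
--         return tail
--     s = str(ori_int // 100)
--     names = ["shata", "hajar", "lakh", "kuti"]
--     widths = [1, 2, 2, 2]
--     parts = []
--     pos = len(s)
--     i = 0
--     while pos > 0:
--         w = widths[i % 4]
--         chunk = s[max(0, pos - w):pos]
--         v = 0
--         for ch in chunk:
--             v = v * 10 + (ord(ch) - 48)
--         if v > 0:
--             parts.append(str(v) + " " + names[i % 4] + " ")
--         elif i % 4 == 3 and pos > w:
--             parts.append("kuti ")
--         pos -= w
--         i += 1
--     return "".join(reversed(parts)) + tail
-- ===== Notes on version B (the rewrite author's own statement) =====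
-- stated objective: alternative
-- what changed: A repeatedly divides the number down with an unrolled four-step div/mod helper that hands a truncated carry between seven-digit megagroups; B instead splits off the bare hundreds tail, renders the remaining number once as a decimal string, slices digit chunks of cycling widths off its right end, and joins the collected named parts at the end.
import Mathlib
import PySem

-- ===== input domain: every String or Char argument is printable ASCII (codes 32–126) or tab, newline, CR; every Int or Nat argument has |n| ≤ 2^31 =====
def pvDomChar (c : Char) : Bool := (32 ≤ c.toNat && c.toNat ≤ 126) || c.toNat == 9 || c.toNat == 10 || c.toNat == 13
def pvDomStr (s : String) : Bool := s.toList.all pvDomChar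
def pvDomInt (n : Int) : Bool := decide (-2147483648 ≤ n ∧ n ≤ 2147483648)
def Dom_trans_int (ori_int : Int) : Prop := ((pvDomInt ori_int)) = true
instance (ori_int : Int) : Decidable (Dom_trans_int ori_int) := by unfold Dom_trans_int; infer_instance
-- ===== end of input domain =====

-- B abandons A's div/mod carry loop entirely: it renders the number once as a decimal string
-- and slices digit chunks off its right end, collecting the named parts in a list that is
-- joined at the end; equivalence of the RETURN values is proved for all Int.

-- ===== PORT A =====
def unitA (hun_int0 : Int) : Int × String :=
  let unit_int : String := ""
  let unit_int := if 0 < PySem.Int.mod hun_int0 10 then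
      PySem.Int.toStr (PySem.Int.mod hun_int0 10) ++ " shata " ++ unit_int else unit_int
  let hun_int := PySem.Int.floordiv hun_int0 10
  let unit_int := if 0 < PySem.Int.mod hun_int 100 then
      PySem.Int.toStr (PySem.Int.mod hun_int 100) ++ " hajar " ++ unit_int else unit_int
  let hun_int := PySem.Int.floordiv hun_int 100
  let unit_int := if 0 < PySem.Int.mod hun_int 100 then
      PySem.Int.toStr (PySem.Int.mod hun_int 100) ++ " lakh " ++ unit_int else unit_int
  let hun_int := PySem.Int.floordiv hun_int 100
  let unit_int := if 0 < PySem.Int.mod hun_int 100 then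
      PySem.Int.toStr (PySem.Int.mod hun_int 100) ++ " kuti " ++ unit_int
    else if 0 < hun_int then "kuti " ++ unit_int else unit_int
  let hun_int := hun_int - PySem.Int.mod hun_int 100
  (hun_int, unit_int)

lemma unitA_fst_lt (ori_int : Int) (h : 100 ≤ ori_int) :
    ((unitA (PySem.Int.floordiv ori_int 100)).1).toNat < ori_int.toNat := by
  have h10 : (0:Int) < 10 := by norm_num
  have h100 : (0:Int) < 100 := by norm_num
  simp only [unitA, PySem.Int.floordiv_eq_ediv_of_pos h10, PySem.Int.floordiv_eq_ediv_of_pos h100,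
    PySem.Int.mod_eq_emod_of_pos h10, PySem.Int.mod_eq_emod_of_pos h100]
  omega

-- the 'while ori_int >= 100' loop of A
def transLoopA (ori_int : Int) (trans_output : String) : String :=
  if _h : 100 ≤ ori_int then
    let p := unitA (PySem.Int.floordiv ori_int 100)
    transLoopA p.1 (p.2 ++ trans_output)
  else trans_output
termination_by ori_int.toNat
decreasing_by exact unitA_fst_lt ori_int _h

def trans_int (ori_int : Int) : String :=
  if ori_int = 0 then "0"
  else
    let trans_output :=
      if PySem.Int.mod ori_int 100 = 0 then "" else PySem.Int.toStr (PySem.Int.mod ori_int 100)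
    transLoopA ori_int trans_output

-- ===== PORT B =====
def namesB : List String := ["shata", "hajar", "lakh", "kuti"]
def widthsB : List Int := [1, 2, 2, 2]

-- 'v = 0; for ch in chunk: v = v*10 + (ord(ch) - 48)'
def chunkVal (cs : List Char) : Int :=
  cs.foldl (fun v c => v * 10 + ((c.toNat : Int) - 48)) 0

lemma widthsB_pos (i : Nat) : 0 < widthsB.getD (i % 4) 0 := by
  have h4 : i % 4 = 0 ∨ i % 4 = 1 ∨ i % 4 = 2 ∨ i % 4 = 3 := by omega
  rcases h4 with h | h | h | h <;> simp [h, widthsB]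

-- the 'while pos > 0' loop of B; returns the final parts list
def strLoopB (ds : List Char) (pos : Int) (i : Nat) (parts : List String) : List String :=
  if _h : 0 < pos then
    let w := widthsB.getD (i % 4) 0
    let chunk := PySem.List.slice ds (some (max 0 (pos - w))) (some pos)
    let v := chunkVal chunk
    let parts' :=
      if 0 < v then parts ++ [PySem.Int.toStr v ++ " " ++ namesB.getD (i % 4) "" ++ " "]
      else if i % 4 = 3 ∧ w < pos then parts ++ ["kuti "] else parts
    strLoopB ds (pos - w) (i + 1) parts'
  else parts
termination_by pos.toNat
decreasing_by have := widthsB_pos i; omega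

def trans_int_alt (ori_int : Int) : String :=
  if ori_int = 0 then "0"
  else
    let r := PySem.Int.mod ori_int 100
    let tail := if r = 0 then "" else PySem.Int.toStr r
    if ori_int < 100 then tail
    else
      let s := PySem.Int.toChars (PySem.Int.floordiv ori_int 100)
      let parts := strLoopB s (s.length : Int) 0 []
      (parts.reverse).foldl (· ++ ·) "" ++ tail

-- ===== PRECONDITION & SPEC =====
def Spec_trans_int (ori_int : Int) (out : String) : Prop := out = trans_int_alt ori_int
instance (ori_int : Int) (out : String) : Decidable (Spec_trans_int ori_int out) := by unfold Spec_trans_int; infer_instance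

-- ===== CLAIM (what is proved, stated in full; the proofs are below) =====
def Claim_equal_trans_int : Prop := ∀ (ori_int : Int), Dom_trans_int ori_int → Spec_trans_int ori_int (trans_int ori_int)

-- ===== LEMMAS AND PROOFS =====

-- proof-side arithmetic counterpart of strLoopB (the groups as (name, divisor) pairs)
def groupsB : List (String × Int) := [("shata", 10), ("hajar", 100), ("lakh", 100), ("kuti", 100)]

lemma loopB_step_lt (n : Int) (i : Nat) (h : 0 < n) :
    (PySem.Int.floordiv n ((groupsB.getD (i % 4) ("", 0)).2)).toNat < n.toNat := by
  have h4 : i % 4 = 0 ∨ i % 4 = 1 ∨ i % 4 = 2 ∨ i % 4 = 3 := by omega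
  have h10 : (0:Int) < 10 := by norm_num
  have h100 : (0:Int) < 100 := by norm_num
  rcases h4 with h4 | h4 | h4 | h4 <;>
    simp only [h4, groupsB, List.getD] <;>
    simp only [List.getElem?_cons_zero, List.getElem?_cons_succ, Option.getD_some,
      PySem.Int.floordiv_eq_ediv_of_pos h10, PySem.Int.floordiv_eq_ediv_of_pos h100] <;>
    omega

-- arithmetic version of B's loop, accumulating the string by prepending
def transLoopB (n : Int) (i : Nat) (out : String) : String :=
  if _h : 0 < n then
    let g := groupsB.getD (i % 4) ("", 0)
    let v := PySem.Int.mod n g.2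
    let n' := PySem.Int.floordiv n g.2
    let out' :=
      if 0 < v then PySem.Int.toStr v ++ " " ++ g.1 ++ " " ++ out
      else if i % 4 = 3 ∧ 0 < n' then "kuti " ++ out else out
    transLoopB n' (i + 1) out'
  else out
termination_by n.toNat
decreasing_by exact loopB_step_lt n i _h

-- one megagroup: from an aligned position, four arithmetic steps consume exactly what one unitA call emits
lemma megagroup (m : Int) (hm : 0 < m) (i : Nat) (hi : i % 4 = 0) (out : String) :
    transLoopB m i out
      = transLoopB ((unitA m).1 / 100) (i + 4) ((unitA m).2 ++ out) := by
  have h10 : (0:Int) < 10 := by norm_num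
  have h100 : (0:Int) < 100 := by norm_num
  have e10 : ∀ a : Int, PySem.Int.floordiv a 10 = a / 10 := fun a => PySem.Int.floordiv_eq_ediv_of_pos h10
  have e100 : ∀ a : Int, PySem.Int.floordiv a 100 = a / 100 := fun a => PySem.Int.floordiv_eq_ediv_of_pos h100
  have m10 : ∀ a : Int, PySem.Int.mod a 10 = a % 10 := fun a => PySem.Int.mod_eq_emod_of_pos h10
  have m100 : ∀ a : Int, PySem.Int.mod a 100 = a % 100 := fun a => PySem.Int.mod_eq_emod_of_pos h100
  have hi1 : (i+1) % 4 = 1 := by omega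
  have hi2 : (i+2) % 4 = 2 := by omega
  have hi3 : (i+3) % 4 = 3 := by omega
  conv_lhs => rw [transLoopB]
  simp only [dif_pos hm, hi, groupsB, List.getD, List.getElem?_cons_zero,
    Option.getD_some, e10, m10,
    show ((0:Nat) = 3) = False from by simp, false_and, if_false]
  by_cases hb1 : 0 < m / 10
  · conv_lhs => rw [transLoopB]
    simp only [dif_pos hb1, hi1, groupsB, List.getD, List.getElem?_cons_zero,
      List.getElem?_cons_succ, Option.getD_some, e100, m100,
      show ((1:Nat) = 3) = False from by simp, false_and, if_false]
    by_cases hb2 : 0 < m / 10 / 100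
    · conv_lhs => rw [transLoopB]
      simp only [dif_pos hb2, hi2, groupsB, List.getD, List.getElem?_cons_zero,
        List.getElem?_cons_succ, Option.getD_some, e100, m100,
        show ((2:Nat) = 3) = False from by simp, false_and, if_false]
      by_cases hb3 : 0 < m / 10 / 100 / 100
      · conv_lhs => rw [transLoopB]
        simp only [dif_pos hb3, hi3, groupsB, List.getD, List.getElem?_cons_zero,
          List.getElem?_cons_succ, Option.getD_some, e100, m100, true_and]
        have hcar : (unitA m).1 / 100 = m / 10 / 100 / 100 / 100 := by
          simp only [unitA, e10, e100, m10, m100]; omega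
        have hidx : i + 1 + 1 + 1 + 1 = i + 4 := by omega
        rw [hcar, hidx]
        congr 1
        simp only [unitA, e10, e100, m10, m100]
        split_ifs <;>
          simp [String.append_assoc] <;>
          omega
      · have hz : m / 10 / 100 / 100 = 0 := by omega
        conv_lhs => rw [transLoopB]
        rw [hz]
        simp only [dif_neg (by omega : ¬ (0:Int) < 0)]
        have hcar : (unitA m).1 / 100 = 0 := by
          simp only [unitA, e10, e100, m10, m100]; omega
        rw [hcar]
        conv_rhs => rw [transLoopB]
        simp only [dif_neg (by omega : ¬ (0:Int) < 0)]
        simp only [unitA, e10, e100, m10, m100, hz]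
        norm_num
        split_ifs <;> simp [String.append_assoc]
    · have hz : m / 10 / 100 = 0 := by omega
      conv_lhs => rw [transLoopB]
      rw [hz]
      simp only [dif_neg (by omega : ¬ (0:Int) < 0)]
      have hcar : (unitA m).1 / 100 = 0 := by
        simp only [unitA, e10, e100, m10, m100]; omega
      rw [hcar]
      conv_rhs => rw [transLoopB]
      simp only [dif_neg (by omega : ¬ (0:Int) < 0)]
      simp only [unitA, e10, e100, m10, m100, hz]
      norm_num
      split_ifs <;> simp [String.append_assoc]
  · have hz : m / 10 = 0 := by omega
    conv_lhs => rw [transLoopB]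
    rw [hz]
    simp only [dif_neg (by omega : ¬ (0:Int) < 0)]
    have hcar : (unitA m).1 / 100 = 0 := by
      simp only [unitA, e10, e100, m10, m100]; omega
    rw [hcar]
    conv_rhs => rw [transLoopB]
    simp only [dif_neg (by omega : ¬ (0:Int) < 0)]
    simp only [unitA, e10, e100, m10, m100, hz]
    norm_num
    split_ifs <;> simp [String.append_assoc]

lemma unitA_fst_nonneg (m : Int) (hm : 0 ≤ m) : 0 ≤ (unitA m).1 := by
  have h10 : (0:Int) < 10 := by norm_num
  have h100 : (0:Int) < 100 := by norm_num
  simp only [unitA, PySem.Int.floordiv_eq_ediv_of_pos h10, PySem.Int.floordiv_eq_ediv_of_pos h100,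
    PySem.Int.mod_eq_emod_of_pos h10, PySem.Int.mod_eq_emod_of_pos h100]
  omega

-- A's loop equals the arithmetic prepend loop, for every nonnegative loop entry value
lemma loop_eq_aux (N : Nat) : ∀ (ori : Int), ori.toNat = N → 0 ≤ ori → ∀ (i : Nat), i % 4 = 0 →
    ∀ (out : String), transLoopA ori out = transLoopB (ori / 100) i out := by
  induction N using Nat.strong_induction_on with
  | _ N IH =>
  intro ori hN h0 i hi out
  by_cases h : 100 ≤ ori
  · have e100 : PySem.Int.floordiv ori 100 = ori / 100 :=
      PySem.Int.floordiv_eq_ediv_of_pos (by norm_num)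
    rw [transLoopA, dif_pos h]
    simp only [e100]
    rw [megagroup (ori / 100) (by omega) i hi out]
    have hlt : ((unitA (ori / 100)).1).toNat < N := by
      have := unitA_fst_lt ori h
      rw [e100] at this; omega
    exact IH _ hlt _ rfl (unitA_fst_nonneg _ (by omega)) (i + 4) (by omega) _
  · have hz : ori / 100 = 0 := by omega
    rw [transLoopA, dif_neg h, hz, transLoopB, dif_neg (by omega : ¬ (0:Int) < 0)]

lemma loop_eq (ori : Int) (h0 : 0 ≤ ori) (i : Nat) (hi : i % 4 = 0) (out : String) :
    transLoopA ori out = transLoopB (ori / 100) i out :=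
  loop_eq_aux ori.toNat ori rfl h0 i hi out

-- ===== decimal-digit theory for B's string loop =====

-- big-endian decimal digits of a natural number
def digitsOf (n : Nat) : List Char :=
  if _h : n < 10 then [Nat.digitChar n]
  else digitsOf (n / 10) ++ [Nat.digitChar (n % 10)]
termination_by n
decreasing_by omega

lemma toDigitsCore_eq : ∀ (fuel n : Nat) (ds : List Char), 0 < fuel → n < 10 ^ fuel →
    Nat.toDigitsCore 10 fuel n ds = digitsOf n ++ ds := by
  intro fuel
  induction fuel with
  | zero => omega
  | succ f IH =>
    intro n ds _ hlt
    rw [Nat.toDigitsCore]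
    by_cases h : n / 10 = 0
    · rw [if_pos h, digitsOf, dif_pos (by omega)]
      have : n % 10 = n := by omega
      rw [this]; rfl
    · rw [if_neg h]
      have hf : 0 < f := by
        rcases Nat.eq_zero_or_pos f with hf0 | hf0
        · subst hf0; norm_num at hlt; omega
        · exact hf0
      have hn10 : n / 10 < 10 ^ f := by
        have : 10 ^ (f + 1) = 10 ^ f * 10 := by ring
        omega
      rw [IH (n / 10) (Nat.digitChar (n % 10) :: ds) hf hn10]
      have hrec : digitsOf n = digitsOf (n / 10) ++ [Nat.digitChar (n % 10)] := by
        conv_lhs => rw [digitsOf]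
        rw [dif_neg (by omega)]
      rw [hrec]
      simp

lemma toDigits10 (n : Nat) : Nat.toDigits 10 n = digitsOf n := by
  have h : n < 10 ^ (n + 1) := by
    calc n < 2 ^ (n + 1) := Nat.lt_two_pow_self.trans (Nat.pow_lt_pow_succ (by norm_num))
    _ ≤ 10 ^ (n + 1) := Nat.pow_le_pow_left (by norm_num) _
  rw [Nat.toDigits, toDigitsCore_eq (n + 1) n [] (by omega) h, List.append_nil]

lemma digitsOf_len_pos (n : Nat) : 0 < (digitsOf n).length := by
  rw [digitsOf]
  split <;> simp

lemma digitsOf_lt (n : Nat) : n < 10 ^ (digitsOf n).length := by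
  induction n using Nat.strong_induction_on with
  | _ n IH =>
  rw [digitsOf]
  by_cases h : n < 10
  · rw [dif_pos h]; simpa using h
  · rw [dif_neg h]
    have h1 := IH (n / 10) (by omega)
    simp only [List.length_append, List.length_cons, List.length_nil, Nat.zero_add]
    have h2 : 10 ^ ((digitsOf (n / 10)).length + 1) = 10 ^ (digitsOf (n / 10)).length * 10 := by ring
    omega

lemma digitsOf_ge (n : Nat) (hn : 1 ≤ n) : 10 ^ ((digitsOf n).length - 1) ≤ n := by
  induction n using Nat.strong_induction_on with
  | _ n IH =>
  rw [digitsOf]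
  by_cases h : n < 10
  · rw [dif_pos h]; simpa using hn
  · rw [dif_neg h]
    have := IH (n / 10) (by omega) (by omega)
    have hp := digitsOf_len_pos (n / 10)
    simp only [List.length_append, List.length_cons, List.length_nil, Nat.zero_add]
    have he : (digitsOf (n / 10)).length + 1 - 1 = ((digitsOf (n / 10)).length - 1) + 1 := by omega
    rw [he, pow_succ]
    omega

lemma digitChar_toNat (d : Nat) (h : d < 10) : (Nat.digitChar d).toNat = 48 + d := by
  interval_cases d <;> decide

lemma chunkVal_append (xs : List Char) (c : Char) :
    chunkVal (xs ++ [c]) = chunkVal xs * 10 + ((c.toNat : Int) - 48) := by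
  simp [chunkVal, List.foldl_append]

lemma chunkVal_drop (n : Nat) : ∀ a : Nat, a ≤ (digitsOf n).length →
    chunkVal ((digitsOf n).drop a) = ((n % 10 ^ ((digitsOf n).length - a) : Nat) : Int) := by
  induction n using Nat.strong_induction_on with
  | _ n IH =>
  intro a ha
  rw [digitsOf] at *
  by_cases h : n < 10
  · rw [dif_pos h] at *
    simp only [List.length_cons, List.length_nil] at ha
    interval_cases a
    · simp [chunkVal, digitChar_toNat n h]; omega
    · simp [chunkVal]
  · rw [dif_neg h] at *
    simp only [List.length_append, List.length_cons, List.length_nil] at ha ⊢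
    set L' := (digitsOf (n / 10)).length with hL'
    by_cases hca : a ≤ L'
    · rw [List.drop_append_of_le_length hca, chunkVal_append,
        IH (n / 10) (by omega) a hca, digitChar_toNat (n % 10) (by omega)]
      have harith : n % 10 ^ (L' + 1 - a) = (n / 10 % 10 ^ (L' - a)) * 10 + n % 10 := by
        have h1 : L' + 1 - a = (L' - a) + 1 := by omega
        rw [h1, pow_succ, Nat.mul_comm (10 ^ (L' - a)) 10]
        rw [Nat.mod_mul]
        ring
      rw [harith]
      push_cast
      ring
    · have hae : a = L' + 1 := by omega
      subst hae
      rw [show L' + 1 = (digitsOf (n / 10) ++ [Nat.digitChar (n % 10)]).length by simp [hL'],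
        List.drop_length]
      simp [chunkVal]

lemma digitsOf_take (n : Nat) (j : Nat) (h : 10 ^ j ≤ n) :
    digitsOf (n / 10 ^ j) = (digitsOf n).take ((digitsOf n).length - j) := by
  induction j with
  | zero => simp
  | succ j IH =>
    have hj : 10 ^ j ≤ n := by
      have : 10 ^ j ≤ 10 ^ (j + 1) := Nat.pow_le_pow_right (by norm_num) (by omega)
      omega
    have hge10 : 10 ≤ n / 10 ^ j := by
      rw [Nat.le_div_iff_mul_le (Nat.pow_pos (by norm_num))]
      rw [pow_succ] at h
      omega
    have hstep : n / 10 ^ (j + 1) = (n / 10 ^ j) / 10 := by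
      rw [pow_succ, ← Nat.div_div_eq_div_mul]
    rw [hstep]
    have hrec : digitsOf (n / 10 ^ j) = digitsOf (n / 10 ^ j / 10) ++ [Nat.digitChar (n / 10 ^ j % 10)] := by
      rw [digitsOf]; rw [dif_neg (by omega)]
    have hlen : (digitsOf (n / 10 ^ j)).length = (digitsOf (n / 10 ^ j / 10)).length + 1 := by
      rw [hrec]; simp
    have hdl : digitsOf (n / 10 ^ j / 10) = (digitsOf (n / 10 ^ j)).take ((digitsOf (n / 10 ^ j)).length - 1) := by
      conv_rhs => rw [hrec]
      simp
    rw [hdl, IH hj]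
    rw [List.take_take, List.length_take]
    congr 1
    have hjlen : j + 1 ≤ (digitsOf n).length := by
      by_contra hc
      have h1 : (digitsOf n).length ≤ j := by omega
      have h2 : 10 ^ (digitsOf n).length ≤ 10 ^ j := Nat.pow_le_pow_right (by norm_num) h1
      have := digitsOf_lt n
      rw [pow_succ] at h
      omega
    omega

-- ===== B's string loop equals the arithmetic prepend loop =====

lemma names_groups (i : Nat) : namesB.getD (i % 4) "" = (groupsB.getD (i % 4) ("", 0)).1 := by
  have h4 : i % 4 = 0 ∨ i % 4 = 1 ∨ i % 4 = 2 ∨ i % 4 = 3 := by omega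
  rcases h4 with h | h | h | h <;> simp [h, namesB, groupsB]

-- parts-appending arithmetic loop (the shape of strLoopB once the digit reading is resolved)
def arithPartsLoop (n : Int) (i : Nat) (parts : List String) : List String :=
  if _h : 0 < n then
    let g := groupsB.getD (i % 4) ("", 0)
    let v := PySem.Int.mod n g.2
    let n' := PySem.Int.floordiv n g.2
    let parts' :=
      if 0 < v then parts ++ [PySem.Int.toStr v ++ " " ++ g.1 ++ " "]
      else if i % 4 = 3 ∧ 0 < n' then parts ++ ["kuti "] else parts
    arithPartsLoop n' (i + 1) parts'
  else parts
termination_by n.toNat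
decreasing_by exact loopB_step_lt n i _h

-- core bridge: reading chunks off the digit string = dividing the number down
lemma strLoop_eq_arith (q : Nat) (hq : 1 ≤ q) : ∀ (pos : Nat), pos ≤ (digitsOf q).length →
    ∀ (i : Nat) (parts : List String),
    strLoopB (digitsOf q) (pos : Int) i parts
      = arithPartsLoop ((q / 10 ^ ((digitsOf q).length - pos) : Nat) : Int) i parts := by
  intro pos
  induction pos using Nat.strong_induction_on with
  | _ pos IH =>
  intro hpos i parts
  set L := (digitsOf q).length with hL
  by_cases h0 : pos = 0
  · subst h0
    have hz : q / 10 ^ L = 0 := Nat.div_eq_of_lt (by simpa using digitsOf_lt q)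
    rw [strLoopB, dif_neg (by norm_num)]
    simp only [Nat.sub_zero]
    rw [hz, arithPartsLoop]
    norm_num
  · have hppos : 0 < pos := by omega
    set p : Nat := q / 10 ^ (L - pos) with hp
    have hLpos : 0 < L := digitsOf_len_pos q
    have hle : 10 ^ (L - pos) ≤ q := by
      calc 10 ^ (L - pos) ≤ 10 ^ (L - 1) := Nat.pow_le_pow_right (by norm_num) (by omega)
      _ ≤ q := digitsOf_ge q hq
    have hp1 : 1 ≤ p := (Nat.one_le_div_iff (Nat.pow_pos (by norm_num))).mpr hle
    have htake : digitsOf p = (digitsOf q).take pos := by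
      rw [hp, digitsOf_take q (L - pos) hle]
      congr 1
      omega
    have hplen : (digitsOf p).length = pos := by
      rw [htake, List.length_take]
      omega
    have hplt : p < 10 ^ pos := by have := digitsOf_lt p; rwa [hplen] at this
    have hpge : 10 ^ (pos - 1) ≤ p := by
      have := digitsOf_ge p hp1; rwa [hplen] at this
    -- generic one-step argument for a digit width w (1 or 2)
    have key : ∀ (w : Nat), 0 < w →
        widthsB.getD (i % 4) 0 = (w : Int) →
        (groupsB.getD (i % 4) ("", 0)).2 = ((10 ^ w : Nat) : Int) →
        strLoopB (digitsOf q) (pos : Int) i parts = arithPartsLoop ((p : Nat) : Int) i parts := by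
      intro w hwpos hwB hgB
      set a : Nat := pos - w with ha
      have hmax : max 0 ((pos : Int) - (w : Int)) = (a : Int) := by omega
      rw [strLoopB, dif_pos (by exact_mod_cast hppos)]
      simp only [hwB, hmax]
      rw [PySem.List.slice_natCast]
      have hchunk : ((digitsOf q).drop a).take (pos - a) = (digitsOf p).drop a := by
        rw [htake, List.drop_take]
      rw [hchunk]
      have hval : chunkVal ((digitsOf p).drop a) = ((p % 10 ^ (pos - a) : Nat) : Int) := by
        rw [chunkVal_drop p a (by omega), hplen]
      have hmodw : p % 10 ^ (pos - a) = p % 10 ^ w := by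
        by_cases hc : w ≤ pos
        · have hpw : pos - a = w := by omega
          rw [hpw]
        · have hlt2 : p < 10 ^ w := by
            calc p < 10 ^ pos := hplt
            _ ≤ 10 ^ w := Nat.pow_le_pow_right (by norm_num) (by omega)
          rw [ha, show pos - (pos - w) = pos from by omega,
            Nat.mod_eq_of_lt hplt, Nat.mod_eq_of_lt hlt2]
      rw [hval, hmodw]
      -- arithmetic side, one step
      have hWpos : (0:Int) < ((10 ^ w : Nat) : Int) := by positivity
      have hmodeq : PySem.Int.mod ((p : Nat) : Int) ((10 ^ w : Nat) : Int)
          = ((p % 10 ^ w : Nat) : Int) := by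
        rw [PySem.Int.mod_eq_emod_of_pos hWpos]
        push_cast
        rfl
      have hdiveq : PySem.Int.floordiv ((p : Nat) : Int) ((10 ^ w : Nat) : Int)
          = ((p / 10 ^ w : Nat) : Int) := by
        rw [PySem.Int.floordiv_eq_ediv_of_pos hWpos]
        push_cast
        rfl
      conv_rhs => rw [arithPartsLoop]
      rw [dif_pos (by exact_mod_cast hp1)]
      simp only [hgB, hmodeq, hdiveq]
      -- the two bare-kuti conditions agree
      have hbare : ((w : Int) < (pos : Int)) ↔ (0 < ((p / 10 ^ w : Nat) : Int)) := by
        constructor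
        · intro hwp
          have hwp' : w < pos := by exact_mod_cast hwp
          have : 10 ^ w ≤ p := by
            calc 10 ^ w ≤ 10 ^ (pos - 1) := Nat.pow_le_pow_right (by norm_num) (by omega)
            _ ≤ p := hpge
          have : 0 < p / 10 ^ w := (Nat.one_le_div_iff (Nat.pow_pos (by norm_num))).mpr this
          exact_mod_cast this
        · intro hdv
          have hdv' : 0 < p / 10 ^ w := by exact_mod_cast hdv
          by_contra hc
          have hc' : pos ≤ w := by omega
          have : p < 10 ^ w := by
            calc p < 10 ^ pos := hplt
            _ ≤ 10 ^ w := Nat.pow_le_pow_right (by norm_num) hc'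
          rw [Nat.div_eq_of_lt this] at hdv'
          omega
      -- the parts that get appended are equal
      have hparts :
          (if 0 < ((p % 10 ^ w : Nat) : Int) then
              parts ++ [PySem.Int.toStr ((p % 10 ^ w : Nat) : Int) ++ " " ++ namesB.getD (i % 4) "" ++ " "]
            else if i % 4 = 3 ∧ (w : Int) < (pos : Int) then parts ++ ["kuti "] else parts)
          = (if 0 < ((p % 10 ^ w : Nat) : Int) then
              parts ++ [PySem.Int.toStr ((p % 10 ^ w : Nat) : Int) ++ " " ++ (groupsB.getD (i % 4) ("", 0)).1 ++ " "]
            else if i % 4 = 3 ∧ 0 < ((p / 10 ^ w : Nat) : Int) then parts ++ ["kuti "] else parts) := by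
        rw [names_groups i]
        by_cases hv : 0 < ((p % 10 ^ w : Nat) : Int)
        · rw [if_pos hv, if_pos hv]
        · rw [if_neg hv, if_neg hv]
          by_cases hk : i % 4 = 3
          · simp only [hk, true_and]
            simp only [hbare]
          · simp [hk]
      rw [hparts]
      set parts' :=
        (if 0 < ((p % 10 ^ w : Nat) : Int) then
            parts ++ [PySem.Int.toStr ((p % 10 ^ w : Nat) : Int) ++ " " ++ (groupsB.getD (i % 4) ("", 0)).1 ++ " "]
          else if i % 4 = 3 ∧ 0 < ((p / 10 ^ w : Nat) : Int) then parts ++ ["kuti "] else parts) with hparts'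
      -- recursive step
      by_cases hc : w < pos
      · have hcast : (pos : Int) - (w : Int) = ((pos - w : Nat) : Int) := by omega
        rw [hcast]
        have hnext : q / 10 ^ (L - (pos - w)) = p / 10 ^ w := by
          rw [hp, Nat.div_div_eq_div_mul, ← pow_add]
          congr 2
          omega
        rw [IH (pos - w) (by omega) (by omega) (i + 1) parts', hnext]
      · have hstop : ¬ (0:Int) < (pos : Int) - (w : Int) := by omega
        have hz : p / 10 ^ w = 0 := Nat.div_eq_of_lt (by
          calc p < 10 ^ pos := hplt
          _ ≤ 10 ^ w := Nat.pow_le_pow_right (by norm_num) (by omega))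
        rw [strLoopB, dif_neg hstop, hz]
        rw [arithPartsLoop, dif_neg (by norm_num)]
    have h4 : i % 4 = 0 ∨ i % 4 = 1 ∨ i % 4 = 2 ∨ i % 4 = 3 := by omega
    rcases h4 with h | h | h | h
    · exact key 1 (by norm_num) (by simp [h, widthsB]) (by simp [h, groupsB])
    · exact key 2 (by norm_num) (by simp [h, widthsB]) (by simp [h, groupsB])
    · exact key 2 (by norm_num) (by simp [h, widthsB]) (by simp [h, groupsB])
    · exact key 2 (by norm_num) (by simp [h, widthsB]) (by simp [h, groupsB])

-- ===== the parts list, reversed and joined, is the prepend loop's string =====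

def jr (parts : List String) : String := parts.reverse.foldl (· ++ ·) ""

lemma foldl_append_init (l : List String) : ∀ a : String,
    l.foldl (· ++ ·) a = a ++ l.foldl (· ++ ·) "" := by
  induction l with
  | nil => intro a; simp
  | cons b l IH =>
    intro a
    simp only [List.foldl_cons]
    rw [IH (a ++ b), IH ("" ++ b)]
    simp [String.append_assoc]

lemma jr_snoc (parts : List String) (x : String) : jr (parts ++ [x]) = x ++ jr parts := by
  simp only [jr, List.reverse_append, List.reverse_cons, List.reverse_nil, List.nil_append,
    List.singleton_append, List.foldl_cons]
  rw [foldl_append_init]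
  simp

lemma arithParts_prepend_aux (N : Nat) : ∀ (n : Int), n.toNat = N → ∀ (i : Nat)
    (parts : List String) (t : String),
    jr (arithPartsLoop n i parts) ++ t = transLoopB n i (jr parts ++ t) := by
  induction N using Nat.strong_induction_on with
  | _ N IH =>
  intro n hN i parts t
  by_cases h : 0 < n
  · rw [arithPartsLoop, dif_pos h, transLoopB, dif_pos h]
    have hlt := loopB_step_lt n i h
    have hrec := IH _ (by omega) (PySem.Int.floordiv n (groupsB.getD (i % 4) ("", 0)).2) rfl (i + 1)
    set g := groupsB.getD (i % 4) ("", 0) with hg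
    by_cases hv : 0 < PySem.Int.mod n g.2
    · simp only [if_pos hv]
      rw [hrec, jr_snoc]
      simp [String.append_assoc]
    · simp only [if_neg hv]
      by_cases hk : i % 4 = 3 ∧ 0 < PySem.Int.floordiv n g.2
      · simp only [if_pos hk]
        rw [hrec, jr_snoc]
        simp [String.append_assoc]
      · simp only [if_neg hk]
        rw [hrec]
  · rw [arithPartsLoop, dif_neg h, transLoopB, dif_neg h]

lemma arithParts_prepend (n : Int) (i : Nat) (parts : List String) (t : String) :
    jr (arithPartsLoop n i parts) ++ t = transLoopB n i (jr parts ++ t) :=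
  arithParts_prepend_aux n.toNat n rfl i parts t

-- ===== VERDICT (by name: the statement is the Claim_ definition above) =====
theorem trans_int_spec : Claim_equal_trans_int := by
  intro ori _hdom
  unfold Spec_trans_int trans_int trans_int_alt
  by_cases h0 : ori = 0
  · simp [h0]
  · simp only [if_neg h0]
    set tail := if PySem.Int.mod ori 100 = 0 then "" else PySem.Int.toStr (PySem.Int.mod ori 100)
      with htail
    by_cases hlt : ori < 100
    · rw [if_pos hlt, transLoopA, dif_neg (by omega)]
    · rw [if_neg hlt]
      have hge : 100 ≤ ori := by omega
      have e100 : PySem.Int.floordiv ori 100 = ori / 100 :=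
        PySem.Int.floordiv_eq_ediv_of_pos (by norm_num)
      have hq1 : 1 ≤ ori / 100 := by omega
      set qn : Nat := (ori / 100).toNat with hqn
      have hqc : ((qn : Nat) : Int) = ori / 100 := by omega
      have hchars : PySem.Int.toChars (PySem.Int.floordiv ori 100) = digitsOf qn := by
        rw [e100, PySem.Int.toChars, if_neg (by omega), toDigits10]
      rw [hchars]
      rw [strLoop_eq_arith qn (by omega) (digitsOf qn).length (le_refl _) 0 []]
      rw [Nat.sub_self, pow_zero, Nat.div_one]
      have hjr : (arithPartsLoop ((qn : Nat) : Int) 0 []).reverse.foldl (· ++ ·) "" ++ tail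
          = transLoopB ((qn : Nat) : Int) 0 (jr [] ++ tail) := arithParts_prepend _ 0 [] tail
      rw [hjr, hqc]
      have hjrnil : jr [] ++ tail = tail := by simp [jr]
      rw [hjrnil]
      exact loop_eq ori (by omega) 0 rfl tail
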